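-- pv_equiv track=rewrite | github.com/miliar/Code_Jam_Webscraper | solutions_python/Problem_179/1250.py | convertToBaseValueOf
-- ===== SOURCE A (Python) =====
-- def convertToBaseValueOf(jamCoin, base, bitStringLength):
-- 	value = 0
-- 	bitmask = 0x00000001
--
-- 	for i in range(bitStringLength):
-- 		if (jamCoin & bitmask) > 0:
-- 			value += base ** i
-- 		bitmask <<= 1
--
-- 	return value
-- ===== SOURCE B (Python) =====
-- def convertToBaseValueOf(jamCoin, base, bitStringLength):
--     # Horner's method: process the bits most-significant first, with a single
--     # multiply-accumulate per bit (value = value*base + bit); no powers, no bitmask.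
--     value = 0
--     for i in reversed(range(bitStringLength)):
--         value = value * base + ((jamCoin >> i) & 1)
--     return value
-- ===== Notes on version B (the rewrite author's own statement) =====
-- stated objective: faster
-- what changed: B evaluates the number by Horner's method over the bits taken most-significant first (value = value*base + bit, extracting each bit with a shift-and-mask), instead of A's least-significant-first summation of explicitly computed powers base**i selected by a growing bitmask.
import Mathlib
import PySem

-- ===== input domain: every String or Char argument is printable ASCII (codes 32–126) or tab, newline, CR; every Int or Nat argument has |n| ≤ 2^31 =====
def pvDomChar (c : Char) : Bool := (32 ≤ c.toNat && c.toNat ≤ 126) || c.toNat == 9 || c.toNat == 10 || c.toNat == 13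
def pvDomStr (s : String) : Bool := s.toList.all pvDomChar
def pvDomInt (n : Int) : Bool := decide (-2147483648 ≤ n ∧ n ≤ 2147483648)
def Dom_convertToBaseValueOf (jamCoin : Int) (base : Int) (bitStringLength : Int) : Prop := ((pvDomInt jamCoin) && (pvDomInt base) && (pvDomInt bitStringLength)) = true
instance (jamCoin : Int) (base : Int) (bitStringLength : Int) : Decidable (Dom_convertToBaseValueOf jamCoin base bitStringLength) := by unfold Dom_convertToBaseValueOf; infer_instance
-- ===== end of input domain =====

-- B replaces A's least-significant-first summation of explicitly computed powers base**i
-- (selected with a growing bitmask) by Horner's method over the bits taken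
-- most-significant first (objective: faster — one multiply-accumulate per bit).

-- ===== PORT A =====
-- Loop state (value, bitmask); `base ** i` has i = the range index, always ≥ 0 here,
-- so `base ^ i.toNat` is exact.
def convertToBaseValueOf (jamCoin : Int) (base : Int) (bitStringLength : Int) : Int :=
  ((PySem.List.pyRange 0 bitStringLength 1).foldl
    (fun (st : Int × Int) i =>
      ((if 0 < PySem.Int.band jamCoin st.2 then st.1 + base ^ i.toNat else st.1),
        st.2 <<< (1 : Nat)))
    (0, 1)).1

-- ===== PORT B =====
-- Horner fold over reversed(range(bitStringLength)); every i in the range is ≥ 0, so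
-- Python's `jamCoin >> i` is exactly `jamCoin >>> i.toNat` (arithmetic shift).
def convertToBaseValueOf_alt (jamCoin : Int) (base : Int) (bitStringLength : Int) : Int :=
  ((PySem.List.pyRange 0 bitStringLength 1).reverse).foldl
    (fun v i => v * base + PySem.Int.band (Int.shiftRight jamCoin i.toNat) 1) 0

-- ===== PRECONDITION & SPEC =====
def Spec_convertToBaseValueOf (jamCoin : Int) (base : Int) (bitStringLength : Int) (out : Int) : Prop := out = convertToBaseValueOf_alt jamCoin base bitStringLength
instance (jamCoin : Int) (base : Int) (bitStringLength : Int) (out : Int) : Decidable (Spec_convertToBaseValueOf jamCoin base bitStringLength out) := by unfold Spec_convertToBaseValueOf; infer_instance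

-- ===== CLAIM (what is proved, stated in full; the proofs are below) =====
def Claim_equal_convertToBaseValueOf : Prop := ∀ (jamCoin : Int) (base : Int) (bitStringLength : Int), Dom_convertToBaseValueOf jamCoin base bitStringLength → Spec_convertToBaseValueOf jamCoin base bitStringLength (convertToBaseValueOf jamCoin base bitStringLength)

-- ===== LEMMAS AND PROOFS =====

-- Floor division of -(q)-1 by a positive m: the "two's complement" identity.
lemma negdiv (q m : Nat) (hm : 0 < m) :
    (-(q : Int) - 1) / (m : Int) = -((q / m : Nat) : Int) - 1 := by
  have hdm := Nat.div_add_mod q m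
  have hr : (q % m : Nat) < m := Nat.mod_lt _ hm
  have h1 : (-(q : Int) - 1) = ((m : Int) - (q % m : Nat) - 1) + (-((q / m : Nat) : Int) - 1) * (m : Int) := by
    have : ((m : Nat) * (q / m) + q % m : Nat) = q := hdm
    push_cast
    nlinarith [this, (by exact_mod_cast congrArg (fun n : Nat => (n : Int)) this : ((m : Int)) * ((q / m : Nat) : Int) + ((q % m : Nat) : Int) = (q : Int))]
  rw [h1, Int.add_mul_ediv_right _ _ (by exact_mod_cast hm.ne' : (m : Int) ≠ 0),
    Int.ediv_eq_zero_of_lt (by push_cast; omega) (by push_cast; omega)]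
  ring

-- Bit k of j, two ways: A's mask test vs the parity of the floored quotient.
lemma bitlem (j : Int) (k : Nat) :
    (0 < PySem.Int.band j ((2 : Int) ^ k)) ↔ (j / (2 : Int) ^ k) % 2 ≠ 0 := by
  have h2k : (0 : Int) < (2 : Int) ^ k := by positivity
  have hp : (0 : Nat) < 2 ^ k := Nat.two_pow_pos k
  have h2kt : ((2 : Int) ^ k).toNat = 2 ^ k := by
    have : (2 : Int) ^ k = ((2 ^ k : Nat) : Int) := by push_cast; ring
    rw [this, Int.toNat_natCast]
  by_cases hj : 0 ≤ j
  · have hdiv : j / (2 : Int) ^ k = ((j.toNat / 2 ^ k : Nat) : Int) := by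
      push_cast
      rw [Int.toNat_of_nonneg hj]
    rw [PySem.Int.band, if_pos hj, if_pos h2k.le, h2kt, Nat.and_two_pow,
      Nat.testBit_eq_decide_div_mod_eq, hdiv]
    generalize j.toNat / 2 ^ k = d
    by_cases h : d % 2 = 1
    · have hband : ((decide (d % 2 = 1)).toNat * 2 ^ k : Nat) = 2 ^ k := by simp [h]
      rw [hband]
      exact iff_of_true (by exact_mod_cast hp) (by omega)
    · have hband : ((decide (d % 2 = 1)).toNat * 2 ^ k : Nat) = 0 := by simp [h]
      rw [hband]
      exact iff_of_false (by simp) (by omega)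
  · have hdiv : j / (2 : Int) ^ k = -((((-j - 1).toNat / 2 ^ k : Nat)) : Int) - 1 := by
      conv_lhs => rw [show j = -(((-j - 1).toNat : Nat) : Int) - 1 from by omega,
        show (2 : Int) ^ k = ((2 ^ k : Nat) : Int) from by push_cast; ring]
      exact negdiv _ _ hp
    rw [PySem.Int.band, if_neg (by omega), if_pos h2k.le, h2kt, Nat.two_pow_and,
      Nat.testBit_eq_decide_div_mod_eq, hdiv]
    generalize (-j - 1).toNat / 2 ^ k = d
    by_cases h : d % 2 = 1
    · have hband : (2 ^ k - 2 ^ k * (decide (d % 2 = 1)).toNat : Nat) = 0 := by simp [h]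
      rw [hband]
      exact iff_of_false (by simp) (by omega)
    · have hband : (2 ^ k - 2 ^ k * (decide (d % 2 = 1)).toNat : Nat) = 2 ^ k := by simp [h]
      rw [hband]
      exact iff_of_true (by exact_mod_cast hp) (by omega)

-- B's extracted bit `(j >> k) & 1` is the parity of the floored quotient.
lemma digit_eq (j : Int) (k : Nat) :
    PySem.Int.band (Int.shiftRight j k) 1 = (j / (2 : Int) ^ k) % 2 := by
  rw [PySem.Int.band_one, PySem.Int.mod_eq_emod_of_pos (by norm_num : (0:Int) < 2)]
  congr 1
  rw [← Int.shiftRight_eq, Int.shiftRight_eq_div_pow]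
  push_cast
  ring

-- A's value after the first N iterations is the power-weighted sum of the bits.
lemma sumA (j b : Int) (N : Nat) :
    ((PySem.List.pyRange 0 (N : Int) 1).foldl
      (fun (st : Int × Int) i =>
        ((if 0 < PySem.Int.band j st.2 then st.1 + b ^ i.toNat else st.1),
          st.2 <<< (1 : Nat))) (0, 1))
      = (∑ i ∈ Finset.range N, (j / (2 : Int) ^ i) % 2 * b ^ i, 2 ^ N) := by
  induction N with
  | zero => simp [PySem.List.pyRange_one_eq_nil]
  | succ n ih =>
    have hcast : ((n + 1 : Nat) : Int) = (n : Int) + 1 := by push_cast; ring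
    rw [hcast, PySem.List.pyRange_one_succ_right (by positivity), List.foldl_append, ih]
    have hmod : (j / (2 : Int) ^ n) % 2 = 0 ∨ (j / (2 : Int) ^ n) % 2 = 1 := by omega
    by_cases ht : 0 < PySem.Int.band j ((2 : Int) ^ n)
    · have h1 : (j / (2 : Int) ^ n) % 2 = 1 := by
        rcases hmod with h | h
        · exact absurd h ((bitlem j n).mp ht)
        · exact h
      simp [ht, Finset.sum_range_succ, h1, Int.shiftLeft_eq, pow_succ]
    · have h0 : (j / (2 : Int) ^ n) % 2 = 0 := by
        by_contra h
        exact ht ((bitlem j n).mpr h)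
      simp [ht, Finset.sum_range_succ, h0, Int.shiftLeft_eq, pow_succ]
-- A Horner fold started at v equals v·b^len plus the fold started at 0.
lemma horner_shift (b : Int) (g : Int → Int) (l : List Int) (v : Int) :
    l.foldl (fun v i => v * b + g i) v
      = v * b ^ l.length + l.foldl (fun v i => v * b + g i) 0 := by
  induction l generalizing v with
  | nil => simp
  | cons a l ih =>
    simp only [List.foldl_cons, List.length_cons]
    rw [ih (v * b + g a), ih (0 * b + g a)]
    ring

-- B's Horner fold over the reversed range computes the same power-weighted sum.
lemma hornerB (j b : Int) (N : Nat) :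
    ((PySem.List.pyRange 0 (N : Int) 1).reverse).foldl
      (fun v i => v * b + PySem.Int.band (Int.shiftRight j i.toNat) 1) 0
      = ∑ i ∈ Finset.range N, (j / (2 : Int) ^ i) % 2 * b ^ i := by
  induction N with
  | zero => simp [PySem.List.pyRange_one_eq_nil]
  | succ n ih =>
    have hcast : ((n + 1 : Nat) : Int) = (n : Int) + 1 := by push_cast; ring
    rw [hcast, PySem.List.pyRange_one_succ_right (by positivity), List.reverse_append]
    simp only [List.reverse_cons, List.reverse_nil, List.nil_append, List.singleton_append,
      List.foldl_cons]
    rw [horner_shift, ih, List.length_reverse, PySem.List.length_pyRange_one]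
    have hlen : ((n : Int) - 0).toNat = n := by omega
    rw [hlen, Finset.sum_range_succ]
    have hd : PySem.Int.band (Int.shiftRight j ((n : Int)).toNat) 1 = (j / (2 : Int) ^ n) % 2 := by
      rw [Int.toNat_natCast, digit_eq]
    rw [hd]
    ring

-- ===== VERDICT (by name: the statement is the Claim_ definition above) =====
theorem convertToBaseValueOf_spec : Claim_equal_convertToBaseValueOf := by
  intro j b L _
  unfold Spec_convertToBaseValueOf convertToBaseValueOf convertToBaseValueOf_alt
  by_cases hL : L ≤ 0
  · rw [PySem.List.pyRange_one_eq_nil hL]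
    simp
  · have hL' : ((L.toNat : Nat) : Int) = L := Int.toNat_of_nonneg (by omega)
    rw [← hL', sumA, hornerB]
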